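-- pv_equiv track=rewrite | github.com/dbalatoni13/nfsmw | tools/dwarf1_subroutine_tree.py | candidate_names
-- ===== SOURCE A (Python) =====
-- from typing import Any, Dict, Iterable, List, Optional
--
-- def normalize_query(name: str) -> str:
--     bare = name.strip()
--     paren = bare.find("(")
--     if paren != -1:
--         bare = bare[:paren]
--     return bare.strip()
--
-- def candidate_names(name: str) -> List[str]:
--     bare = normalize_query(name)
--     if not bare:
--         return []
--     parts = bare.split("::")
--     out: List[str] = []
--     for index in range(len(parts)):
--         candidate = "::".join(parts[index:]).strip()
--         if candidate and candidate not in out: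
--             out.append(candidate)
--     return out
-- ===== SOURCE B (Python) =====
-- from typing import List
--
-- def normalize_query(name: str) -> str:
--     bare = name.strip()
--     paren = bare.find("(")
--     if paren != -1:
--         bare = bare[:paren]
--     return bare.strip()
--
-- def candidate_names(name: str) -> List[str]:
--     bare = normalize_query(name)
--     if not bare:
--         return []
--     parts = bare.split("::")
--     acc = parts[-1]
--     suffixes = [acc]
--     for part in reversed(parts[:-1]):
--         acc = part + "::" + acc
--         suffixes.append(acc)
--     out: List[str] = []
--     for suffix in reversed(suffixes):
--         candidate = suffix.strip()
--         if candidate and candidate not in out: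
--             out.append(candidate)
--     return out
-- ===== Notes on version B (the rewrite author's own statement) =====
-- stated objective: alternative
-- what changed: Builds each suffix of the separator-split parts incrementally right-to-left with a string accumulator (each suffix is one concatenation onto the previous), then reverses and filters, instead of re-joining the tail of the parts list from scratch for every index.
import Mathlib
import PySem

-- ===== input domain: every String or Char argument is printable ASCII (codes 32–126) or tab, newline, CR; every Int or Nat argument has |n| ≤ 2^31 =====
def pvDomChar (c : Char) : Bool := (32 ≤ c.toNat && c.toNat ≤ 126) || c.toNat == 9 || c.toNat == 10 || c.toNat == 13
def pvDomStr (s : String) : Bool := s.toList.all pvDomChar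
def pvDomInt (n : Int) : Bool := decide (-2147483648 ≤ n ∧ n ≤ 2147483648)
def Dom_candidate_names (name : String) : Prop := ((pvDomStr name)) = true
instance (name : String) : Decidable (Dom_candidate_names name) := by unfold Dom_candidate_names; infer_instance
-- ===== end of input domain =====

-- B builds each '::'-suffix incrementally right-to-left with a string accumulator instead of
-- re-joining parts[index:] from scratch for every index (objective: alternative decomposition).

-- ===== PORT A =====
def normalize_query (name : String) : String :=
  let bare := PySem.Str.strip name
  let paren := PySem.Str.find bare "("
  let bare := if paren ≠ -1 then PySem.Str.slice bare none (some paren) else bare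
  PySem.Str.strip bare

def candidate_names (name : String) : List String :=
  let bare := normalize_query name
  if bare = "" then []
  else
    let parts := (PySem.Str.split? bare "::").getD []
    (PySem.List.pyRange 0 (parts.length : Int)).foldl
      (fun out index =>
        let candidate := PySem.Str.strip (PySem.Str.join "::" (PySem.List.slice parts (some index) none))
        if candidate ≠ "" ∧ candidate ∉ out then out ++ [candidate] else out) []

-- ===== PORT B =====
def candidate_names_alt (name : String) : List String :=
  let bare := normalize_query name
  if bare = "" then []
  else
    let parts := (PySem.Str.split? bare "::").getD []
    match parts.getLast? with
    | none => []  -- unreachable: str.split with a nonempty separator never yields an empty list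
    | some lastPart =>
      let st := parts.dropLast.reverse.foldl
        (fun (st : String × List String) part =>
          let acc := part ++ "::" ++ st.1
          (acc, st.2 ++ [acc])) (lastPart, [lastPart])
      st.2.reverse.foldl
        (fun out suffix =>
          let candidate := PySem.Str.strip suffix
          if candidate ≠ "" ∧ candidate ∉ out then out ++ [candidate] else out) []

-- ===== PRECONDITION & SPEC =====
def Spec_candidate_names (name : String) (out : List String) : Prop := out = candidate_names_alt name
instance (name : String) (out : List String) : Decidable (Spec_candidate_names name out) := by unfold Spec_candidate_names; infer_instance

-- ===== CLAIM (what is proved, stated in full; the proofs are below) =====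
def Claim_equal_candidate_names : Prop := ∀ (name : String), Dom_candidate_names name → Spec_candidate_names name (candidate_names name)

-- ===== LEMMAS AND PROOFS =====

/-- The common dedup/filter step both loops perform on an (unstripped) candidate string. -/
def pvStep (out : List String) (s : String) : List String :=
  let candidate := PySem.Str.strip s
  if candidate ≠ "" ∧ candidate ∉ out then out ++ [candidate] else out

theorem pv_join_cons (a : String) (qs : List String) (h : qs ≠ []) :
    a ++ "::" ++ PySem.Str.join "::" qs = PySem.Str.join "::" (a :: qs) := by
  cases qs with
  | nil => exact absurd rfl h
  | cons q rest =>
    rw [← String.toList_inj]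
    simp [PySem.Str.toList_join, PySem.Chars.join_cons_cons, String.toList_append]

theorem pv_join_singleton (p : String) : PySem.Str.join "::" [p] = p := by
  rw [← String.toList_inj]
  simp [PySem.Str.toList_join, PySem.Chars.join_singleton]

/-- Invariant of B's accumulator loop: after folding over `l` the accumulator is the join of
`l.reverse ++ [last]` and the recorded list holds the joins of all its suffix stages. -/
theorem pv_bfold (lastPart : String) (l : List String) :
    l.foldl (fun (st : String × List String) part =>
        let acc := part ++ "::" ++ st.1
        (acc, st.2 ++ [acc])) (lastPart, [lastPart])
      = (PySem.Str.join "::" (l.reverse ++ [lastPart]),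
         (List.range (l.length + 1)).map
           (fun k => PySem.Str.join "::" ((l.take k).reverse ++ [lastPart]))) := by
  induction l using List.reverseRecOn with
  | nil => simp [pv_join_singleton]
  | append_singleton l x ih =>
    rw [List.foldl_append, ih]
    have hne : l.reverse ++ [lastPart] ≠ [] := by simp
    have hacc : x ++ "::" ++ PySem.Str.join "::" (l.reverse ++ [lastPart])
        = PySem.Str.join "::" ((l ++ [x]).reverse ++ [lastPart]) := by
      rw [pv_join_cons _ _ hne]; simp
    simp only [List.foldl_cons, List.foldl_nil]
    refine Prod.ext ?_ ?_
    · simpa using hacc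
    · show (List.range (l.length + 1)).map
          (fun k => PySem.Str.join "::" ((l.take k).reverse ++ [lastPart]))
          ++ [x ++ "::" ++ PySem.Str.join "::" (l.reverse ++ [lastPart])]
        = (List.range ((l ++ [x]).length + 1)).map
          (fun k => PySem.Str.join "::" (((l ++ [x]).take k).reverse ++ [lastPart]))
      rw [hacc]
      conv_rhs => rw [show (l ++ [x]).length + 1 = (l.length + 1) + 1 by simp,
        List.range_succ, List.map_append]
      congr 1
      · apply List.map_congr_left
        intro k hk
        have hk' : k ≤ l.length := by simpa [Nat.lt_succ_iff] using List.mem_range.mp hk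
        rw [List.take_append_of_le_length hk']
      · simp [List.take_of_length_le]

/-- The reversed recorded suffix list is exactly A's list of joins of `parts.drop k`. -/
theorem pv_suffixes_eq (ps : List String) (x : String) :
    ((List.range (ps.reverse.length + 1)).map
        (fun k => PySem.Str.join "::" ((ps.reverse.take k).reverse ++ [x]))).reverse
      = (List.range (ps ++ [x]).length).map
        (fun k => PySem.Str.join "::" ((ps ++ [x]).drop k)) := by
  apply List.ext_getElem
  · simp
  · intro i h1 h2
    simp only [List.length_reverse, List.length_map, List.length_range, List.length_append,
      List.length_cons, List.length_nil] at h1 h2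
    have hi : i ≤ ps.length := by simpa [Nat.lt_succ_iff] using h1
    rw [List.getElem_reverse, List.getElem_map, List.getElem_map, List.getElem_range,
      List.getElem_range]
    have hlen : (List.range (ps.reverse.length + 1)).length - 1 - i = ps.length - i := by
      simp
    congr 1
    rw [List.take_reverse, List.reverse_reverse, List.drop_append_of_le_length hi]
    congr 2
    simp
    omega

theorem candidate_names_eq_alt (name : String) :
    candidate_names name = candidate_names_alt name := by
  unfold candidate_names candidate_names_alt
  by_cases hb : normalize_query name = ""
  · rw [hb]
    rfl
  · rw [if_neg hb, if_neg hb]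
    rcases List.eq_nil_or_concat ((PySem.Str.split? (normalize_query name) "::").getD []) with hnil | ⟨ps, x, hcat⟩
    · rw [hnil]
      simp
    · rw [hcat]
      simp only [List.concat_eq_append, List.getLast?_concat, List.dropLast_concat]
      have hA : ∀ (parts : List String),
          (PySem.List.pyRange 0 (parts.length : Int)).foldl
            (fun out index =>
              let candidate := PySem.Str.strip (PySem.Str.join "::" (PySem.List.slice parts (some index) none))
              if candidate ≠ "" ∧ candidate ∉ out then out ++ [candidate] else out) []
          = ((List.range parts.length).map
              (fun k => PySem.Str.join "::" (parts.drop k))).foldl pvStep [] := by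
        intro parts
        rw [PySem.List.pyRange_zero_natCast, List.foldl_map, List.foldl_map]
        simp only [pvStep, PySem.List.slice_from_natCast]
      rw [hA, pv_bfold, ← pv_suffixes_eq ps x]
      rfl

-- ===== VERDICT (by name: the statement is the Claim_ definition above) =====
theorem candidate_names_spec : Claim_equal_candidate_names := by
  intro name _
  unfold Spec_candidate_names
  exact candidate_names_eq_alt name
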